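-- pv_equiv track=rewrite | github.com/1005281342/LeetCodePro | src/p0300/python3/solution.py | a
-- ===== SOURCE A (Python) =====
-- from collections import Counter
--
-- def a(string):
--     cd = Counter(string)
--
--     if cd["1"] == 0:
--         if cd["0"] > 2:
--             return "Impossible"
--         else:
--             return string
--
--     ans = ""
--     while cd["0"] > 1 and cd["1"] > 0:
--         ans = "00" + ans
--         cd["0"] -= 2
--         ans = "1" + ans
--         cd["1"] -= 1
--     if cd["0"] == 1:
--         if cd["1"] == 0:
--             return "0" + ans
--         else:
--             return "Impossible"
--     return cd["1"] * "1" + ans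
-- ===== SOURCE B (Python) =====
-- def a(string):
--     z = string.count("0")
--     o = string.count("1")
--     if o == 0:
--         return string if z <= 2 else "Impossible"
--     k = min(o, z // 2)
--     rz = z - 2 * k
--     ro = o - k
--     if rz == 1:
--         return ("0" + "100" * k) if ro == 0 else "Impossible"
--     return "1" * ro + "100" * k
-- ===== Notes on version B (the rewrite author's own statement) =====
-- stated objective: faster
-- what changed: Replaces the quadratic while-loop of repeated string prepends with a closed-form computation k=min(ones, zeros//2) and string multiplication.
import Mathlib
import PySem

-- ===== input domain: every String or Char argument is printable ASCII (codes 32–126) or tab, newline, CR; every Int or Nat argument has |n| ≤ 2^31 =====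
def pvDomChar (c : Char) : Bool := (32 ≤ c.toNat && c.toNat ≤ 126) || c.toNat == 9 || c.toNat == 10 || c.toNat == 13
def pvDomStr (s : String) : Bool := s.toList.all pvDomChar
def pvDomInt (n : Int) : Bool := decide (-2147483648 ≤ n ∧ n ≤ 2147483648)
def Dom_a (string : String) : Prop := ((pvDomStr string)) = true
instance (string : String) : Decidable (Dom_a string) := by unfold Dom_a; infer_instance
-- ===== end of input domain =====

-- B replaces A's O(n^2) loop of string prepends by a closed form k = min(ones, zeros//2) and string multiplication.

-- ===== PORT A =====
-- the while loop of A: prepends "00" then "1", decrementing the counters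
def aLoopA : Nat → Nat → List Char → Nat × Nat × List Char
  | z, o, ans =>
    if z > 1 ∧ o > 0 then aLoopA (z - 2) (o - 1) ('1' :: '0' :: '0' :: ans)
    else (z, o, ans)
  termination_by z o _ => o
  decreasing_by omega

def a (string : String) : String :=
  -- Counter(string): only the counts of '1' and '0' are consulted
  let cd1 := string.toList.count '1'
  let cd0 := string.toList.count '0'
  if cd1 = 0 then
    if cd0 > 2 then "Impossible" else string
  else
    let r := aLoopA cd0 cd1 []
    if r.1 = 1 then
      if r.2.1 = 0 then String.mk ('0' :: r.2.2) else "Impossible"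
    else
      String.mk (List.replicate r.2.1 '1' ++ r.2.2)

-- ===== PORT B =====
def a_alt (string : String) : String :=
  let z := string.toList.count '0'
  let o := string.toList.count '1'
  if o = 0 then
    if z ≤ 2 then string else "Impossible"
  else
    let k := min o (z / 2)
    let rz := z - 2 * k
    let ro := o - k
    if rz = 1 then
      if ro = 0 then String.mk ('0' :: (List.replicate k ['1', '0', '0']).flatten)
      else "Impossible"
    else
      String.mk (List.replicate ro '1' ++ (List.replicate k ['1', '0', '0']).flatten)

-- ===== PRECONDITION & SPEC =====
def Spec_a (string : String) (out : String) : Prop := out = a_alt string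
instance (string : String) (out : String) : Decidable (Spec_a string out) := by unfold Spec_a; infer_instance

-- ===== CLAIM (what is proved, stated in full; the proofs are below) =====
def Claim_equal_a : Prop := ∀ (string : String), Dom_a string → Spec_a string (a string)

-- ===== LEMMAS AND PROOFS =====

-- A's loop in closed form: it runs exactly min o (z/2) times, each prepending "100"
theorem aLoopA_eq (o : Nat) : ∀ (z : Nat) (ans : List Char),
    aLoopA z o ans =
      (z - 2 * min o (z / 2), o - min o (z / 2),
        (List.replicate (min o (z / 2)) ['1', '0', '0']).flatten ++ ans) := by
  induction o with
  | zero =>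
    intro z ans
    rw [aLoopA]
    simp
  | succ o ih =>
    intro z ans
    rw [aLoopA]
    by_cases hz : z > 1
    · have hk : min (o + 1) (z / 2) = min o ((z - 2) / 2) + 1 := by omega
      rw [if_pos ⟨hz, Nat.succ_pos o⟩]
      simp only [Nat.add_sub_cancel]
      rw [ih]
      simp only [Prod.mk.injEq]
      refine ⟨by omega, by omega, ?_⟩
      simp only [hk, List.replicate_succ', List.flatten_append]
      simp
    · have hk : min (o + 1) (z / 2) = 0 := by omega
      rw [if_neg (by omega)]
      simp [hk]

theorem a_spec : Claim_equal_a := by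
  intro s _
  unfold Spec_a a a_alt
  simp only [aLoopA_eq]
  by_cases h1 : s.toList.count '1' = 0
  · rw [if_pos h1, if_pos h1]
    by_cases h0 : s.toList.count '0' > 2
    · rw [if_pos h0, if_neg (by omega)]
    · rw [if_neg h0, if_pos (by omega)]
  · rw [if_neg h1, if_neg h1]
    simp only [List.append_nil]
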